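-- pv_equiv track=rewrite | github.com/jorve/lucidDreamBaseball | py/analytics/roster_state.py | _has_duplicate_assignments
-- ===== SOURCE A (Python) =====
-- def _has_duplicate_assignments(team_map):
-- 	seen = {}
-- 	for team_id, team in team_map.items():
-- 		for player_id in team["players"].keys():
-- 			if player_id in seen and seen[player_id] != team_id:
-- 				return True
-- 			seen[player_id] = team_id
-- 	return False
-- ===== SOURCE B (Python) =====
-- def _has_duplicate_assignments(team_map):
-- 	all_ids = [player_id for team in team_map.values() for player_id in team["players"]]
-- 	return len(all_ids) != len(set(all_ids))
-- ===== Notes on version B (the rewrite author's own statement) =====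
-- stated objective: simpler
-- what changed: B drops A's stateful seen-dict with per-player team tracking and early return, and instead flattens all player ids into one list and compares total vs distinct cardinality (len(all) != len(set(all))).
import Mathlib
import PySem

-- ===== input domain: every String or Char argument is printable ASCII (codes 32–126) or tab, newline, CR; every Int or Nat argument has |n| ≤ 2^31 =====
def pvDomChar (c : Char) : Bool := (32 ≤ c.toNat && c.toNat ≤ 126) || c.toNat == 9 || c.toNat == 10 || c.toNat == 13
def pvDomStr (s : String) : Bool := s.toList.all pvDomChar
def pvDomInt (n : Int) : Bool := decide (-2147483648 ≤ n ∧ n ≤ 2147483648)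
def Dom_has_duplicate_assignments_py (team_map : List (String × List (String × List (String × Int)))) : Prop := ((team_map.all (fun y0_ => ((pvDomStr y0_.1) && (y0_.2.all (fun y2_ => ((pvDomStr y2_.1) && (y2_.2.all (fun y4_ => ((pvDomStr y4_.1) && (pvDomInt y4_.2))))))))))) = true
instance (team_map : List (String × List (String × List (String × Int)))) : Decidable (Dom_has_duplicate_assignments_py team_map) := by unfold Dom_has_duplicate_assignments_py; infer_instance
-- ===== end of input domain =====

-- B replaces A's stateful seen-dict with early return by a flatten-and-compare-cardinalities test (same cost, simpler).


-- ===== PORT A =====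
-- inner loop: for player_id in team["players"].keys(): …  (none = the early 'return True')
def procTeamA (tid : String) (seen : PySem.Dict String String) : List String → Option (PySem.Dict String String)
  | [] => some seen
  | pid :: ids =>
    match seen.get? pid with
    | some t => if t ≠ tid then none else procTeamA tid (seen.insert pid tid) ids
    | none => procTeamA tid (seen.insert pid tid) ids

-- outer loop: for team_id, team in team_map.items(): …  (a missing "players" key is Python's KeyError, excluded by Pre_)
def goTeamsA (seen : PySem.Dict String String) : List (String × List (String × List (String × Int))) → Bool
  | [] => false
  | (tid, team) :: rest =>
    match (PySem.Dict.mk team).get? "players" with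
    | none => false
    | some players =>
      match procTeamA tid seen ((PySem.Dict.mk players).keys) with
      | none => true
      | some seen' => goTeamsA seen' rest

def has_duplicate_assignments_py (team_map : List (String × List (String × List (String × Int)))) : Bool :=
  goTeamsA PySem.Dict.empty team_map

-- ===== PORT B =====
def has_duplicate_assignments_py_alt (team_map : List (String × List (String × List (String × Int)))) : Bool :=
  let all_ids := team_map.flatMap (fun t => (PySem.Dict.mk ((PySem.Dict.mk t.2).getD "players" [])).keys)
  decide (PySem.List.len all_ids ≠ PySem.Set.len (PySem.Set.ofList all_ids))

-- ===== PRECONDITION & SPEC =====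
-- a team is usable iff it has a "players" key (else Python raises KeyError) with unique player ids
def teamOK (team : List (String × List (String × Int))) : Bool :=
  match (PySem.Dict.mk team).get? "players" with
  | none => false
  | some pl => decide (pl.map Prod.fst).Nodup

-- Pre_ excludes (a) teams without a "players" key, where the Python A raises KeyError, and
-- (b) association lists with duplicate team ids or duplicate player ids inside one team, which
-- do not represent any Python dict (dict keys are unique), so A's Python never receives them.
def Pre_has_duplicate_assignments_py (team_map : List (String × List (String × List (String × Int)))) : Prop :=
  (team_map.map Prod.fst).Nodup ∧ ∀ t ∈ team_map, teamOK t.2 = true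
instance (team_map : List (String × List (String × List (String × Int)))) : Decidable (Pre_has_duplicate_assignments_py team_map) := by unfold Pre_has_duplicate_assignments_py; infer_instance

def pvWitness_has_duplicate_assignments_py : (List (String × List (String × List (String × Int)))) :=
  [("t1", [("players", [("p1", 1), ("p2", 2)])]), ("t2", [("players", [("p3", 3)])])]

def Spec_has_duplicate_assignments_py (team_map : List (String × List (String × List (String × Int)))) (out : Bool) : Prop := out = has_duplicate_assignments_py_alt team_map
instance (team_map : List (String × List (String × List (String × Int)))) (out : Bool) : Decidable (Spec_has_duplicate_assignments_py team_map out) := by unfold Spec_has_duplicate_assignments_py; infer_instance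

-- ===== CLAIM (what is proved, stated in full; the proofs are below) =====
def Claim_equal_has_duplicate_assignments_py : Prop := ∀ (team_map : List (String × List (String × List (String × Int)))), Dom_has_duplicate_assignments_py team_map → Pre_has_duplicate_assignments_py team_map → Spec_has_duplicate_assignments_py team_map (has_duplicate_assignments_py team_map)

-- ===== LEMMAS AND PROOFS =====

-- the player ids one team contributes (B's flatten function)
def teamPlayers (team : List (String × List (String × Int))) : List String :=
  (PySem.Dict.mk ((PySem.Dict.mk team).getD "players" [])).keys

lemma procTeamA_clash (tid : String) (ids : List String) (seen : PySem.Dict String String)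
    (hids : ids.Nodup)
    (hv : ∀ k v, seen.get? k = some v → v = tid → k ∉ ids)
    (hclash : ∃ pid ∈ ids, seen.contains pid = true) :
    procTeamA tid seen ids = none := by
  induction ids generalizing seen with
  | nil => simp at hclash
  | cons pid ids ih =>
    rcases List.nodup_cons.mp hids with ⟨hpid, hnd⟩
    cases hget : seen.get? pid with
    | some t =>
      have hne : t ≠ tid := fun h => hv pid t hget h (List.mem_cons_self ..)
      simp [procTeamA, hget, hne]
    | none =>
      simp only [procTeamA, hget]
      apply ih _ hnd
      · intro k v h hvt
        rw [PySem.Dict.get?_insert] at h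
        split at h
        · subst ‹k = pid›; exact hpid
        · exact fun hk => hv k v h hvt (List.mem_cons_of_mem _ hk)
      · obtain ⟨q, hq, hcq⟩ := hclash
        have hqne : q ≠ pid := by
          rintro rfl
          rw [PySem.Dict.contains_eq_isSome_get?, hget] at hcq
          simp at hcq
        refine ⟨q, ?_, ?_⟩
        · cases List.mem_cons.mp hq with
          | inl h => exact absurd h hqne
          | inr h => exact h
        · rw [PySem.Dict.contains_insert, hcq, Bool.or_true]

lemma procTeamA_ok (tid : String) (ids : List String) (seen : PySem.Dict String String)
    (hids : ids.Nodup)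
    (hdisj : ∀ pid ∈ ids, seen.contains pid = false) :
    procTeamA tid seen ids = some (PySem.Dict.mk (seen.items ++ ids.map (fun p => (p, tid)))) := by
  induction ids generalizing seen with
  | nil => simp [procTeamA]
  | cons pid ids ih =>
    rcases List.nodup_cons.mp hids with ⟨hpid, hnd⟩
    have hc : seen.contains pid = false := hdisj pid (List.mem_cons_self ..)
    have hget : seen.get? pid = none := by
      rw [PySem.Dict.contains_eq_isSome_get?] at hc
      exact Option.not_isSome_iff_eq_none.mp (by simp [hc])
    simp only [procTeamA, hget]
    rw [ih (seen.insert pid tid) hnd ?_, PySem.Dict.items_insert_of_not_contains seen tid hc]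
    · simp
    · intro q hq
      rw [PySem.Dict.contains_insert, hdisj q (List.mem_cons_of_mem _ hq), Bool.or_false]
      exact beq_eq_false_iff_ne.mpr (fun h => hpid (h ▸ hq))

lemma goTeamsA_eq (teams : List (String × List (String × List (String × Int))))
    (seen : PySem.Dict String String)
    (hk : seen.keys.Nodup)
    (hnd : (teams.map Prod.fst).Nodup)
    (hok : ∀ t ∈ teams, teamOK t.2 = true)
    (hv : ∀ k v, seen.get? k = some v → v ∉ teams.map Prod.fst) :
    goTeamsA seen teams = !decide ((seen.keys ++ teams.flatMap (fun t => teamPlayers t.2)).Nodup) := by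
  induction teams generalizing seen with
  | nil => simp [goTeamsA, hk]
  | cons hd rest ih =>
    obtain ⟨tid, team⟩ := hd
    have hok0 : teamOK team = true := hok (tid, team) (List.mem_cons_self ..)
    rcases List.nodup_cons.mp hnd with ⟨htid, hndr⟩
    unfold teamOK at hok0
    cases hpl : (PySem.Dict.mk team).get? "players" with
    | none => rw [hpl] at hok0; simp at hok0
    | some pl =>
      rw [hpl] at hok0
      have hplnd : (pl.map Prod.fst).Nodup := by simpa using hok0
      have hkeys : (PySem.Dict.mk pl).keys = pl.map Prod.fst := by simp [PySem.Dict.keys]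
      have htp : teamPlayers team = pl.map Prod.fst := by
        unfold teamPlayers
        rw [PySem.Dict.getD_eq_get?_getD, hpl]
        simp [PySem.Dict.keys]
      simp only [goTeamsA, hpl, hkeys]
      by_cases hcl : ∃ pid ∈ pl.map Prod.fst, seen.contains pid = true
      · rw [procTeamA_clash tid (pl.map Prod.fst) seen hplnd
          (fun k v h hvt => absurd (hvt ▸ hv k v h) (by simp))
          hcl]
        obtain ⟨q, hq, hcq⟩ := hcl
        have hqk : q ∈ seen.keys := (PySem.Dict.contains_iff_mem_keys _ _).mp hcq
        have hnot : ¬ (seen.keys ++ (teamPlayers team ++ List.flatMap (fun t => teamPlayers t.2) rest)).Nodup := by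
          intro hnodup
          rcases List.nodup_append.mp hnodup with ⟨_, _, hdisj⟩
          exact hdisj q hqk q (List.mem_append.mpr (Or.inl (htp ▸ hq))) rfl
        simp only [List.flatMap_cons]
        simp [hnot]
      · have hdisj : ∀ pid ∈ pl.map Prod.fst, seen.contains pid = false := fun pid hpid =>
          Bool.eq_false_iff.mpr (fun h => hcl ⟨pid, hpid, h⟩)
        rw [procTeamA_ok tid (pl.map Prod.fst) seen hplnd hdisj]
        set seen' := PySem.Dict.mk (seen.items ++ (pl.map Prod.fst).map (fun p => (p, tid))) with hseen'
        change goTeamsA seen' rest = _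
        have hkeys' : seen'.keys = seen.keys ++ pl.map Prod.fst := by
          simp [hseen', PySem.Dict.keys, List.map_map, Function.comp_def]
        have hnotin : ∀ pid ∈ pl.map Prod.fst, pid ∉ seen.keys := fun pid hpid h =>
          absurd ((PySem.Dict.contains_iff_mem_keys _ _).mpr h) (by simp [hdisj pid hpid])
        have hk' : seen'.keys.Nodup := by
          rw [hkeys', List.nodup_append]
          exact ⟨hk, hplnd, fun a ha b hb hab => hnotin b hb (hab ▸ ha)⟩
        rw [ih seen' hk' hndr (fun t ht => hok t (List.mem_cons_of_mem _ ht)) ?_]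
        · rw [hkeys']
          simp [htp, List.append_assoc]
        · intro k v h hvr
          have hmem : (k, v) ∈ seen'.items := PySem.Dict.mem_items_of_get?_eq_some seen' h
          simp only [hseen'] at hmem
          rcases List.mem_append.mp hmem with hold | hnew
          · have := PySem.Dict.get?_of_mem_items seen hold hk
            exact hv k v this (List.mem_cons_of_mem _ hvr)
          · obtain ⟨p, _, hp⟩ := List.mem_map.mp hnew
            have hvtid : v = tid := (congrArg Prod.snd hp).symm
            exact htid (hvtid ▸ hvr)

lemma dedup_length_eq_iff (xs : List String) :
    (PySem.Set.ofList xs).length = xs.length ↔ xs.Nodup := by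
  rw [← PySem.List.dedup_eq_ofList]
  have hsub : List.Subperm (PySem.List.dedup xs) xs :=
    (PySem.List.nodup_dedup xs).subperm (fun a ha => (PySem.List.mem_dedup xs a).mp ha)
  constructor
  · intro h
    have hperm : (PySem.List.dedup xs).Perm xs := hsub.perm_of_length_le (le_of_eq h.symm)
    exact hperm.nodup (PySem.List.nodup_dedup xs)
  · intro hn
    have hsub2 : List.Subperm xs (PySem.List.dedup xs) :=
      hn.subperm (fun a ha => (PySem.List.mem_dedup xs a).mpr ha)
    exact le_antisymm hsub.length_le hsub2.length_le

-- the cardinality test decides Nodup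
lemma not_nodup_eq_len_ne (xs : List String) :
    (!decide xs.Nodup) = decide ((xs.length : Int) ≠ ((PySem.Set.ofList xs).length : Int)) := by
  by_cases hn : xs.Nodup
  · rw [(dedup_length_eq_iff xs).mpr hn]
    simp [hn]
  · have hne : (PySem.Set.ofList xs).length ≠ xs.length :=
      fun h => hn ((dedup_length_eq_iff xs).mp h)
    simp only [hn, decide_false, Bool.not_false]
    symm
    rw [decide_eq_true_iff]
    intro h
    exact hne (by exact_mod_cast h.symm)

-- ===== VERDICT (by name: the statement is the Claim_ definition above) =====
theorem has_duplicate_assignments_py_spec : Claim_equal_has_duplicate_assignments_py := by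
  intro tm _ hpre
  unfold Spec_has_duplicate_assignments_py has_duplicate_assignments_py has_duplicate_assignments_py_alt
  rw [goTeamsA_eq tm PySem.Dict.empty (by simp [PySem.Dict.empty]) hpre.1 hpre.2
    (by intro k v h; simp [PySem.Dict.empty, PySem.Dict.get?] at h)]
  have hke : (PySem.Dict.empty : PySem.Dict String String).keys = [] := by simp [PySem.Dict.empty]
  rw [hke, List.nil_append]
  simp only [teamPlayers, PySem.List.len_eq, PySem.Set.len]
  exact not_nodup_eq_len_ne _
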